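-- pv_equiv track=rewrite | github.com/chiwon-an/TIL | 04_algorithm_basic/02-algorithm-basic-2/99_offline/베이비진/sol2.py | baby_jin
-- ===== SOURCE A (Python) =====
-- from itertools import combinations
--
-- def run_triple(mixture):
--     a = []
--     for i in mixture:
--         a.append(i)
--
--     if sorted(a) == list(range(min(a), min(a)+3)):
--         return True
--
--     if len(set(a)) == 1:
--         return True
--
--     else: return False
--
-- def baby_jin(cards):
--
--     # 탈출 조건
--
--     if len(cards) == 0:
--         return 'true'
--
--
--     # 3장을 뽑기
--     comb = list(combinations(cards, 3))
--
--     for item in comb: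
--         if run_triple(item) == True:
--             temp_cards = cards[:]
--             for card in item:
--                 temp_cards.remove(card)
--
--             return baby_jin(temp_cards)
--
--     return 'false'
-- ===== SOURCE B (Python) =====
-- # B: same greedy as A (remove the lexicographically-first valid triple, repeat),
-- # but found by index scanning with arithmetic "completion" candidates instead of
-- # materializing all C(n,3) combinations and sorting/setting each one; iterative loop.
--
-- def _completions(a, b):
--     # values c such that the multiset {a, b, c} is a triple or a consecutive run
--     if a == b:
--         return (a,)
--     lo, hi = (a, b) if a < b else (b, a)
--     d = hi - lo
--     if d == 1:
--         return (lo - 1, hi + 1)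
--     if d == 2:
--         return (lo + 1,)
--     return ()
--
-- def _find_third(cand, tail):
--     for c in tail:
--         if c in cand:
--             return c
--     return None
--
-- def _find_pair(a, rest):
--     while rest:
--         b, tail = rest[0], rest[1:]
--         c = _find_third(_completions(a, b), tail)
--         if c is not None:
--             return (a, b, c)
--         rest = tail
--     return None
--
-- def _find_triple(cards):
--     rest = cards
--     while rest:
--         r = _find_pair(rest[0], rest[1:])
--         if r is not None:
--             return r
--         rest = rest[1:]
--     return None
--
-- def baby_jin(cards):
--     cards = list(cards)
--     while cards:
--         t = _find_triple(cards)
--         if t is None: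
--             return 'false'
--         for v in t:
--             cards.remove(v)
--     return 'true'
-- ===== Notes on version B (the rewrite author's own statement) =====
-- stated objective: faster
-- what changed: Instead of materializing all C(n,3) combinations and testing each by sorting and set-building, B scans index pairs once, computes the at-most-two arithmetic 'completion' values that would make the pair a run or triple, and looks for the first later card among them; the outer greedy removal is an iterative loop rather than recursion.
import Mathlib
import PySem

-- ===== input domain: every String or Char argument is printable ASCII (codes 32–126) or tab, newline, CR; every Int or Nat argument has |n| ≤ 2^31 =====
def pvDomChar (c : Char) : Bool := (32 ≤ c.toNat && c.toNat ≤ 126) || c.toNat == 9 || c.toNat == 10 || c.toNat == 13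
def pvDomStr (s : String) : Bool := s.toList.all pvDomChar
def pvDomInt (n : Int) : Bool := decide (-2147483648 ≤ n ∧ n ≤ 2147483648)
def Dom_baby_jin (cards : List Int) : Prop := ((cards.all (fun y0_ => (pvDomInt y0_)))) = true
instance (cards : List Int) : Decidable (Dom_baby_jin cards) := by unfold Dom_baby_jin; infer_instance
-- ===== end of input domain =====

-- B changes the search (index/suffix scan with arithmetic completion candidates, iterative outer loop)
-- instead of materializing all C(n,3) combinations and testing each by sort/set; same return value as A.

-- ===== PORT A =====
-- itertools.combinations(cards, 2) / (cards, 3), in Python's lexicographic-by-index order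
def pyComb2 : List Int → List (Int × Int)
  | [] => []
  | x :: xs => (xs.map (fun y => (x, y))) ++ pyComb2 xs

def pyComb3 : List Int → List (Int × Int × Int)
  | [] => []
  | x :: xs => ((pyComb2 xs).map (fun p => (x, p.1, p.2))) ++ pyComb3 xs

-- run_triple(mixture) for a 3-tuple
def run_triple (t : Int × Int × Int) : Bool :=
  let a : List Int := [t.1, t.2.1, t.2.2]      -- the for-loop building list a
  match PySem.List.min? a (fun x => x) with
  | none => false                               -- unreachable: min() of the empty list raises
  | some m =>
    if PySem.List.sorted a (fun x => x) false == PySem.List.pyRange m (m + 3) 1 then true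
    else if PySem.Set.len (PySem.Set.ofList a) == 1 then true
    else false

-- length decrease used by both ports' termination proofs
theorem pvRemoveLen {xs l' : List Int} {v : Int}
    (h : PySem.List.remove? xs v = some l') : l'.length + 1 = xs.length := by
  have hv : v ∈ xs := by
    by_contra hv
    rw [(PySem.List.remove?_eq_none_iff xs v).mpr hv] at h
    cases h
  rw [PySem.List.remove?_eq_some_erase xs v hv] at h
  have h' : xs.erase v = l' := by injection h
  have h1 := List.length_erase_of_mem hv
  rw [h'] at h1
  have h2 : 0 < xs.length := List.length_pos_of_mem hv
  omega

def baby_jin (cards : List Int) : String :=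
  if cards = [] then "true"
  else
    match hf : (pyComb3 cards).find? run_triple with   -- 'for item in comb: if run_triple(item) == True:'
    | none => "false"
    | some t =>
      -- temp_cards = cards[:]; for card in item: temp_cards.remove(card)
      match h1 : PySem.List.remove? cards t.1 with
      | none => "false"                                -- unreachable ValueError
      | some c1 =>
        match h2 : PySem.List.remove? c1 t.2.1 with
        | none => "false"                              -- unreachable ValueError
        | some c2 =>
          match h3 : PySem.List.remove? c2 t.2.2 with
          | none => "false"                            -- unreachable ValueError
          | some c3 => baby_jin c3
termination_by cards.length
decreasing_by
  have e1 := pvRemoveLen h1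
  have e2 := pvRemoveLen h2
  have e3 := pvRemoveLen h3
  omega

-- ===== PORT B =====
def completions (a b : Int) : List Int :=
  if a == b then [a]
  else
    let lo := if a < b then a else b
    let hi := if a < b then b else a
    let d := hi - lo
    if d == 1 then [lo - 1, hi + 1]
    else if d == 2 then [lo + 1]
    else []

def findThird (cand : List Int) : List Int → Option Int
  | [] => none
  | c :: rest => if cand.contains c then some c else findThird cand rest

def findPair (a : Int) : List Int → Option (Int × Int × Int)
  | [] => none
  | b :: tail =>
    match findThird (completions a b) tail with
    | some c => some (a, b, c)
    | none => findPair a tail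

def findTriple : List Int → Option (Int × Int × Int)
  | [] => none
  | x :: rest =>
    match findPair x rest with
    | some r => some r
    | none => findTriple rest

def baby_jin_alt (cards : List Int) : String :=
  if cards = [] then "true"                            -- while cards: … / return 'true'
  else
    match findTriple cards with
    | none => "false"
    | some t =>
      match h1 : PySem.List.remove? cards t.1 with     -- for v in t: cards.remove(v)
      | none => "false"                                -- unreachable ValueError
      | some c1 =>
        match h2 : PySem.List.remove? c1 t.2.1 with
        | none => "false"
        | some c2 =>
          match h3 : PySem.List.remove? c2 t.2.2 with
          | none => "false"
          | some c3 => baby_jin_alt c3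
termination_by cards.length
decreasing_by
  have e1 := pvRemoveLen h1
  have e2 := pvRemoveLen h2
  have e3 := pvRemoveLen h3
  omega

-- ===== PRECONDITION & SPEC =====
def Spec_baby_jin (cards : List Int) (out : String) : Prop := out = baby_jin_alt cards
instance (cards : List Int) (out : String) : Decidable (Spec_baby_jin cards out) := by unfold Spec_baby_jin; infer_instance

-- ===== CLAIM (what is proved, stated in full; the proofs are below) =====
def Claim_equal_baby_jin : Prop := ∀ (cards : List Int), Dom_baby_jin cards → Spec_baby_jin cards (baby_jin cards)

-- ===== LEMMAS AND PROOFS =====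

-- the pointwise fact: c completes (a, b) iff (a, b, c) is a run or a triple
theorem set3 (a b c : Int) :
    PySem.Set.len (PySem.Set.ofList [a, b, c]) = 1 ↔ (b = a ∧ c = a) := by
  by_cases hba : b = a <;> by_cases hca : c = a <;>
    simp [PySem.Set.ofList, PySem.Set.add, PySem.Set.len, PySem.Set.contains, hba, hca] <;>
    split_ifs <;> simp_all

theorem range3 (m : Int) : PySem.List.pyRange m (m + 3) 1 = [m, m + 1, m + 2] := by
  rw [PySem.List.pyRange_one_cons (by omega), PySem.List.pyRange_one_cons (by omega),
      PySem.List.pyRange_one_cons (by omega), PySem.List.pyRange_one_eq_nil (by omega)]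
  norm_num
  omega

theorem mem_completions (a b c : Int) :
    (completions a b).contains c = true ↔
    ((a = b ∧ c = a) ∨
     (max a b - min a b = 1 ∧ (c = min a b - 1 ∨ c = max a b + 1)) ∨
     (max a b - min a b = 2 ∧ c = min a b + 1)) := by
  by_cases hab : a = b
  · subst hab
    simp [completions]
  · by_cases hlt : a < b
    · have h1 : min a b = a := by omega
      have h2 : max a b = b := by omega
      simp only [completions, beq_iff_eq, if_neg hab, if_pos hlt, h1, h2]
      split_ifs <;> simp [hab] <;> omega
    · have h1 : min a b = b := by omega
      have h2 : max a b = a := by omega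
      simp only [completions, beq_iff_eq, if_neg hab, if_neg hlt, h1, h2]
      split_ifs <;> simp [hab] <;> omega

theorem completions_contains (a b c : Int) :
    (completions a b).contains c = run_triple (a, b, c) := by
  rw [Bool.eq_iff_iff]
  simp only [run_triple]
  rw [PySem.List.min?_id_cons]
  simp only [List.foldl]
  rw [mem_completions]
  rcases le_total a b with hab | hab <;> rcases le_total b c with hbc | hbc <;>
    rcases le_total a c with hac | hac
  case _ =>
    have hs := PySem.List.sorted_id_eq_of_perm_of_pairwise [a,b,c] [a,b,c]
      (List.Perm.refl _) (by simp [List.pairwise_cons]; omega)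
    have hm : min (min a b) c = a := by omega
    simp only [hs, hm, range3, beq_iff_eq, set3, List.cons.injEq]
    split_ifs <;> simp_all <;> omega
  case _ =>
    have hs := PySem.List.sorted_id_eq_of_perm_of_pairwise [a,b,c] [a,b,c]
      (List.Perm.refl _) (by simp [List.pairwise_cons]; omega)
    have hm : min (min a b) c = a := by omega
    simp only [hs, hm, range3, beq_iff_eq, set3, List.cons.injEq]
    split_ifs <;> simp_all <;> omega
  case _ =>
    have hs := PySem.List.sorted_id_eq_of_perm_of_pairwise [a,b,c] [a,c,b]
      (List.Perm.cons a (List.Perm.swap b c [])) (by simp [List.pairwise_cons]; omega)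
    have hm : min (min a b) c = a := by omega
    simp only [hs, hm, range3, beq_iff_eq, set3, List.cons.injEq]
    split_ifs <;> simp_all <;> omega
  case _ =>
    have hs := PySem.List.sorted_id_eq_of_perm_of_pairwise [a,b,c] [c,a,b]
      ((List.Perm.swap a c [b]).trans (List.Perm.cons a (List.Perm.swap b c []))) (by simp [List.pairwise_cons]; omega)
    have hm : min (min a b) c = c := by omega
    simp only [hs, hm, range3, beq_iff_eq, set3, List.cons.injEq]
    split_ifs <;> simp_all <;> omega
  case _ =>
    have hs := PySem.List.sorted_id_eq_of_perm_of_pairwise [a,b,c] [b,a,c]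
      (List.Perm.swap a b [c]) (by simp [List.pairwise_cons]; omega)
    have hm : min (min a b) c = b := by omega
    simp only [hs, hm, range3, beq_iff_eq, set3, List.cons.injEq]
    split_ifs <;> simp_all <;> omega
  case _ =>
    have hs := PySem.List.sorted_id_eq_of_perm_of_pairwise [a,b,c] [b,c,a]
      ((List.Perm.cons b (List.Perm.swap a c [])).trans (List.Perm.swap a b [c])) (by simp [List.pairwise_cons]; omega)
    have hm : min (min a b) c = b := by omega
    simp only [hs, hm, range3, beq_iff_eq, set3, List.cons.injEq]
    split_ifs <;> simp_all <;> omega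
  case _ =>
    have hs := PySem.List.sorted_id_eq_of_perm_of_pairwise [a,b,c] [a,b,c]
      (List.Perm.refl _) (by simp [List.pairwise_cons]; omega)
    have hm : min (min a b) c = a := by omega
    simp only [hs, hm, range3, beq_iff_eq, set3, List.cons.injEq]
    split_ifs <;> simp_all <;> omega
  case _ =>
    have hs := PySem.List.sorted_id_eq_of_perm_of_pairwise [a,b,c] [c,b,a]
      ((List.Perm.swap b c [a]).trans ((List.Perm.cons b (List.Perm.swap a c [])).trans (List.Perm.swap a b [c]))) (by simp [List.pairwise_cons]; omega)
    have hm : min (min a b) c = c := by omega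
    simp only [hs, hm, range3, beq_iff_eq, set3, List.cons.injEq]
    split_ifs <;> simp_all <;> omega

theorem findThird_eq (a b : Int) (l : List Int) :
    findThird (completions a b) l = l.find? (fun c => run_triple (a, b, c)) := by
  induction l with
  | nil => rfl
  | cons c rest ih =>
    simp only [findThird, List.find?, completions_contains]
    cases run_triple (a, b, c) <;> simp [ih]

theorem findPair_eq (a : Int) (l : List Int) :
    findPair a l = ((pyComb2 l).find? (fun p => run_triple (a, p.1, p.2))).map (fun p => (a, p.1, p.2)) := by
  induction l with
  | nil => rfl
  | cons b tail ih =>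
    have hmap : (tail.map (fun y => (b, y))).find? (fun p => run_triple (a, p.1, p.2))
        = (tail.find? (fun c => run_triple (a, b, c))).map (fun c => (b, c)) := by
      rw [List.find?_map]
      simp [Function.comp_def]
    simp only [findPair, pyComb2, List.find?_append, hmap, findThird_eq]
    cases hf : tail.find? (fun c => run_triple (a, b, c)) <;> simp [ih]

theorem findTriple_eq (l : List Int) :
    findTriple l = (pyComb3 l).find? run_triple := by
  induction l with
  | nil => rfl
  | cons x rest ih =>
    simp only [findTriple, pyComb3, List.find?_append, findPair_eq, ih]
    rw [List.find?_map]
    cases hf : (pyComb2 rest).find? (fun p => run_triple (x, p.1, p.2)) <;>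
      simp [Function.comp_def, hf]

theorem main_eq (cards : List Int) : baby_jin cards = baby_jin_alt cards := by
  fun_induction baby_jin cards with
  | case1 => rw [baby_jin_alt]; simp
  | case2 cards hne hf =>
    rw [baby_jin_alt, if_neg hne, findTriple_eq]; simp only [hf]
  | case3 cards hne t hf h1 =>
    rw [baby_jin_alt, if_neg hne, findTriple_eq]; simp only [hf]
    repeat' split
    all_goals simp_all
  | case4 cards hne t hf c1 h1 h2 =>
    rw [baby_jin_alt, if_neg hne, findTriple_eq]; simp only [hf]
    repeat' split
    all_goals simp_all
  | case5 cards hne t hf c1 h1 c2 h2 h3 =>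
    rw [baby_jin_alt, if_neg hne, findTriple_eq]; simp only [hf]
    repeat' split
    all_goals simp_all
  | case6 cards hne t hf c1 h1 c2 h2 c3 h3 ih =>
    rw [baby_jin_alt, if_neg hne, findTriple_eq]; simp only [hf]
    repeat' split
    all_goals simp_all

-- ===== VERDICT (by name: the statement is the Claim_ definition above) =====
theorem baby_jin_spec : Claim_equal_baby_jin := by
  intro cards _
  exact main_eq cards
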